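-- pv_equiv track=rewrite | github.com/PavlovichVladislav/TPP | turbines/turbine_hop_new.py | find_second_closest_line
-- ===== SOURCE A (Python) =====
-- def find_second_closest_line(entrance_collection_point, found_line, lines):
--     if entrance_collection_point > found_line['collection_point']:
--         filtered_lines = [line for line in lines if line['collection_point'] > found_line['collection_point']]
--         closest_line = min(filtered_lines, key=lambda x: x['collection_point'] - found_line['collection_point'],
--                            default=None)
--     elif entrance_collection_point < found_line['collection_point']:
--         filtered_lines = [line for line in lines if line['collection_point'] < found_line['collection_point']]
--         closest_line = min(filtered_lines, key=lambda x: found_line['collection_point'] - x['collection_point'],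
--                            default=None)
--     else:
--         return None  # здесь стоит обработать исключение в будущем
--
--     return closest_line
-- ===== SOURCE B (Python) =====
-- def find_second_closest_line(entrance_collection_point, found_line, lines):
--     fcp = found_line['collection_point']
--     if entrance_collection_point == fcp:
--         return None
--     if entrance_collection_point > fcp:
--         key = lambda line: line['collection_point'] - fcp
--     else:
--         key = lambda line: fcp - line['collection_point']
--     for line in sorted(lines, key=key):
--         if key(line) > 0:
--             return line
--     return None
-- ===== Notes on version B (the rewrite author's own statement) =====
-- stated objective: alternative
-- what changed: A filters lines on one side of found_line's collection_point and takes min() with a shifted key; B never filters or minimizes: it stably sorts all lines by the signed distance key and returns the first element of the sorted order whose key is positive (stability makes ties agree with min()).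
import Mathlib
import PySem

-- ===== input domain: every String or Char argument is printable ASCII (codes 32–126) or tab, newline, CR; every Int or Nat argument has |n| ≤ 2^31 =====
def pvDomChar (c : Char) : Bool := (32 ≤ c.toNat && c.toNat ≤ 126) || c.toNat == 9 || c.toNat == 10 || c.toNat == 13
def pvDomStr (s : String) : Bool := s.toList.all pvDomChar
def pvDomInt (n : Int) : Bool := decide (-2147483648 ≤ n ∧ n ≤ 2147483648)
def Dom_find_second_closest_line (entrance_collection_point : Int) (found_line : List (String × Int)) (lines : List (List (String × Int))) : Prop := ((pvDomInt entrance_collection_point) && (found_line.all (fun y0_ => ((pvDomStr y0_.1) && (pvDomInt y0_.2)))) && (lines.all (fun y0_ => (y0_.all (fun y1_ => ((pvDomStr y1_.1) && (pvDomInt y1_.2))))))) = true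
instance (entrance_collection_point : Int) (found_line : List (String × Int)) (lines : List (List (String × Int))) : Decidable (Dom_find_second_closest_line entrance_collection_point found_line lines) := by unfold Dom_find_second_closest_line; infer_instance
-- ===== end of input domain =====

-- B replaces A's per-branch filter+min() with a stable sort by signed distance followed by taking the first positive-key element; objective: alternative algorithm (return value only).


-- shared dict lookup: d['collection_point'] (first match in the association list; none = KeyError)
def pvCP? (l : List (String × Int)) : Option Int :=
  match l with
  | [] => none
  | (k, v) :: t => if k = "collection_point" then some v else pvCP? t

-- ===== PORT A =====
def find_second_closest_line (entrance_collection_point : Int) (found_line : List (String × Int)) (lines : List (List (String × Int))) : Option (List (String × Int)) :=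
  match pvCP? found_line with
  | none => none  -- Python raises KeyError; excluded by Pre_
  | some fcp =>
    if entrance_collection_point > fcp then
      PySem.List.min? (lines.filter (fun line => decide ((pvCP? line).getD 0 > fcp)))
        (fun x => (pvCP? x).getD 0 - fcp)
    else if entrance_collection_point < fcp then
      PySem.List.min? (lines.filter (fun line => decide ((pvCP? line).getD 0 < fcp)))
        (fun x => fcp - (pvCP? x).getD 0)
    else none

-- ===== PORT B =====
def find_second_closest_line_alt (entrance_collection_point : Int) (found_line : List (String × Int)) (lines : List (List (String × Int))) : Option (List (String × Int)) :=
  match pvCP? found_line with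
  | none => none  -- Python raises KeyError; excluded by Pre_
  | some fcp =>
    if entrance_collection_point = fcp then none
    else
      let key : List (String × Int) → Int :=
        if entrance_collection_point > fcp then fun line => (pvCP? line).getD 0 - fcp
        else fun line => fcp - (pvCP? line).getD 0
      (PySem.List.sorted lines key).find? (fun line => decide (key line > 0))

-- ===== PRECONDITION & SPEC =====
-- Pre_ excludes exactly the inputs on which the Python raises KeyError: found_line must carry the
-- 'collection_point' key, and — unless the function returns None immediately because the entrance
-- equals found_line's collection_point — every element of lines must carry it too.
def Pre_find_second_closest_line (entrance_collection_point : Int) (found_line : List (String × Int)) (lines : List (List (String × Int))) : Prop :=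
  "collection_point" ∈ found_line.map Prod.fst ∧
  (found_line.lookup "collection_point" = some entrance_collection_point ∨
   ∀ l ∈ lines, "collection_point" ∈ l.map Prod.fst)
instance (entrance_collection_point : Int) (found_line : List (String × Int)) (lines : List (List (String × Int))) : Decidable (Pre_find_second_closest_line entrance_collection_point found_line lines) := by unfold Pre_find_second_closest_line; infer_instance

def pvWitness_find_second_closest_line : Int × (List (String × Int)) × (List (List (String × Int))) :=
  (5, [("collection_point", 3)], [[("collection_point", 4)], [("collection_point", 10)]])

def Spec_find_second_closest_line (entrance_collection_point : Int) (found_line : List (String × Int)) (lines : List (List (String × Int))) (out : Option (List (String × Int))) : Prop := out = find_second_closest_line_alt entrance_collection_point found_line lines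
instance (entrance_collection_point : Int) (found_line : List (String × Int)) (lines : List (List (String × Int))) (out : Option (List (String × Int))) : Decidable (Spec_find_second_closest_line entrance_collection_point found_line lines out) := by unfold Spec_find_second_closest_line; infer_instance

-- ===== CLAIM (what is proved, stated in full; the proofs are below) =====
def Claim_equal_find_second_closest_line : Prop := ∀ (entrance_collection_point : Int) (found_line : List (String × Int)) (lines : List (List (String × Int))), Dom_find_second_closest_line entrance_collection_point found_line lines → Pre_find_second_closest_line entrance_collection_point found_line lines → Spec_find_second_closest_line entrance_collection_point found_line lines (find_second_closest_line entrance_collection_point found_line lines)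

-- ===== LEMMAS AND PROOFS =====

-- inserting a non-positive-key element never changes the first positive-key element
theorem find?_insertBy_neg {α : Type} (key : α → Int) (x : α) (hx : ¬ 0 < key x) :
    ∀ (l : List α),
      (PySem.List.insertBy (fun a b => decide (key a < key b)) x l).find? (fun y => decide (key y > 0))
        = l.find? (fun y => decide (key y > 0)) := by
  intro l
  induction l with
  | nil => simp [PySem.List.insertBy, hx]
  | cons y ys ih =>
    by_cases hlt : key x < key y
    · simp [PySem.List.insertBy, hlt, hx]
    · by_cases hy : 0 < key y
      · simp [PySem.List.insertBy, hlt, List.find?, hy]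
      · simp only [PySem.List.insertBy, hlt, decide_false, Bool.false_eq_true, if_false]
        simp [List.find?, hy, ih]

-- inserting a positive-key element behaves exactly like min?'s accumulator step
theorem find?_insertBy_pos {α : Type} (key : α → Int) (x : α) (hx : 0 < key x) :
    ∀ (l : List α),
      (PySem.List.insertBy (fun a b => decide (key a < key b)) x l).find? (fun y => decide (key y > 0))
        = (match l.find? (fun y => decide (key y > 0)) with
           | none => some x
           | some m => if key x < key m then some x else some m) := by
  intro l
  induction l with
  | nil => simp [PySem.List.insertBy, hx]
  | cons y ys ih =>
    by_cases hlt : key x < key y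
    · have hy : 0 < key y := by omega
      simp [PySem.List.insertBy, hlt, List.find?, hx, hy]
    · by_cases hy : 0 < key y
      · have : ¬ key x < key y := hlt
        simp [PySem.List.insertBy, hlt, List.find?, hy]
      · simp only [PySem.List.insertBy, hlt, decide_false, Bool.false_eq_true, if_false]
        simp [List.find?, hy, ih]

-- the heart of the equivalence: first positive-key element of the stable sort
-- equals min() (first extremal) over the positive-key elements in original order
theorem find?_sorted_eq_min?_filter {α : Type} (key : α → Int) (xs : List α) :
    (PySem.List.sorted xs key).find? (fun y => decide (key y > 0))
      = PySem.List.min? (xs.filter (fun y => decide (key y > 0))) key := by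
  induction xs using List.reverseRecOn with
  | nil => rfl
  | append_singleton xs x ih =>
    rw [PySem.List.sorted_eq_foldl_insertBy, List.foldl_append] at *
    rw [← PySem.List.sorted_eq_foldl_insertBy] at *
    simp only [List.foldl_cons, List.foldl_nil]
    unfold PySem.List.min? at *
    rw [List.filter_append, List.filter_cons, List.filter_nil]
    by_cases hx : 0 < key x
    · rw [find?_insertBy_pos key x hx, ih]
      simp only [hx, decide_true, if_true, List.foldl_append, List.foldl_cons, List.foldl_nil]
      rfl
    · rw [find?_insertBy_neg key x hx, ih]
      simp [hx]

-- ===== VERDICT (by name: the statement is the Claim_ definition above) =====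
theorem find_second_closest_line_spec : Claim_equal_find_second_closest_line := by
  intro e fl lines _ _
  unfold Spec_find_second_closest_line find_second_closest_line find_second_closest_line_alt
  cases hfl : pvCP? fl with
  | none => rfl
  | some fcp =>
    by_cases hgt : e > fcp
    · have hne : ¬ e = fcp := by omega
      simp only [hgt, if_true, hne, if_false, gt_iff_lt]
      rw [find?_sorted_eq_min?_filter (fun line => (pvCP? line).getD 0 - fcp) lines]
      congr 1
      apply List.filter_congr
      intro a _
      simp only [decide_eq_decide]
      omega
    · by_cases hlt : e < fcp
      · have hne : ¬ e = fcp := by omega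
        simp only [hgt, if_false, hlt, if_true, hne, gt_iff_lt]
        rw [find?_sorted_eq_min?_filter (fun line => fcp - (pvCP? line).getD 0) lines]
        congr 1
        apply List.filter_congr
        intro a _
        simp only [decide_eq_decide]
        omega
      · have : e = fcp := by omega
        simp [this]
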